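-- pv_equiv track=rewrite | github.com/benquick123/code-profiling | code/batch-2/vse-naloge-brez-testov/DN7-Z-060.py | sosedi_s_stevilom_min
-- ===== SOURCE A (Python) =====
-- def imamoMino(x,y,mine):
--     """
--         Vrni 1, če je na polju s koordinatami `(x, y)` mina.
--         Vrne 0, če na polju ni mine.
--
--         Args:
--             x (int): koordinata x
--             y (int): koordinata y
--             mine (set of tuple of int): koordinate min
--
--         Returns:
--             1: imamo mino
--             0: nimamo mine
--         """
--     item = (x,y)
--     if item in mine: #
--         return 1
--     else: return 0
--
-- def sosedov(x, y, mine):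
--     """
--     Vrni število sosedov polja s koordinatami `(x, y)` na katerih je mina.
--     Polje samo ne šteje.
--
--     Args:
--         x (int): koordinata x
--         y (int): koordinata y
--         mine (set of tuple of int): koordinate min
--
--     Returns:
--         int: število sosedov
--     """
--     stevec_min = 0
--     for i in range(x - 1, x + 2):
--         for j in range(y - 1, y + 2):
--             if i > -1 and j > -1 and not (i == x and j == y):
--                 stevec_min += imamoMino(i, j, mine)
--     return stevec_min
--
-- def sosedi_s_stevilom_min(mine, s, v, stevilomin):
--     iskano_polje = set()
--     for i in range(s):
--         for j in range(v):
--             if sosedov(i, j, mine) == stevilomin:  # imamo stevilo min na sosednjih poljih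
--                 item = (i, j)
--                 iskano_polje.add(item) #dodamo polje v množico iskanih polj
--     return iskano_polje
-- ===== SOURCE B (Python) =====
-- def sosedi_s_stevilom_min(mine, s, v, stevilomin):
--     if s < 1 or v < 1:
--         return set()
--     # 3x3 window sums over the mine-indicator grid: horizontal windows per row,
--     # then sums of three consecutive rows, minus the cell itself.
--     grid = [[1 if (x, y) in mine else 0 for y in range(v + 1)] for x in range(s + 1)]
--     horiz = [[(row[j - 1] if j > 0 else 0) + row[j] + row[j + 1] for j in range(v)]
--              for row in grid]
--     zeros = [0] * v
--     found = set()
--     for i in range(s):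
--         above = horiz[i - 1] if i > 0 else zeros
--         here = horiz[i]
--         below = horiz[i + 1]
--         row = grid[i]
--         for j in range(v):
--             if above[j] + here[j] + below[j] - row[j] == stevilomin:
--                 found.add((i, j))
--     return found
-- ===== Notes on version B (the rewrite author's own statement) =====
-- stated objective: faster
-- what changed: Instead of calling a per-cell 3x3 probe (sosedov: 9 range steps with set lookups and two helper calls for every grid cell), B rasterizes the mine indicator once and computes neighbour counts as separable sliding-window sums (horizontal windows per row, then sums of three consecutive rows, minus the cell itself).
import Mathlib
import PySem

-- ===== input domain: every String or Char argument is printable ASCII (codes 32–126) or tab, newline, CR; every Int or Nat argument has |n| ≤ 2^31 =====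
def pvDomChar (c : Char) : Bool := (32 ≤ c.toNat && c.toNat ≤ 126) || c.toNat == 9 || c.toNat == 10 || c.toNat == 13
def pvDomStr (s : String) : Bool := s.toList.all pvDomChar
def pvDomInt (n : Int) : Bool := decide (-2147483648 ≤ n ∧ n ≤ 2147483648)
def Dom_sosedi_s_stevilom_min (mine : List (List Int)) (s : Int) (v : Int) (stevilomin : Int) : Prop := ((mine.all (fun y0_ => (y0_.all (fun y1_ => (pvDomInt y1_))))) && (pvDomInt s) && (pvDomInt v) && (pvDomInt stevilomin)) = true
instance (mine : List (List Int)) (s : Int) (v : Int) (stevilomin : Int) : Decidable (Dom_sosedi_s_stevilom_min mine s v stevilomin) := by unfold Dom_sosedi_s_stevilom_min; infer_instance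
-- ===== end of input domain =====

-- B replaces A's per-cell 3×3 probing (a sosedov call with set lookups and helper
-- calls for every grid cell) by rasterizing the mine indicator once and computing the
-- neighbour counts as separable sliding-window sums (objective: faster, constant-factor).

-- ===== PORT A =====
def imamoMino (x y : Int) (mine : List (List Int)) : Int :=
  if [x, y] ∈ mine then 1 else 0

def sosedov (x y : Int) (mine : List (List Int)) : Int :=
  (PySem.List.pyRange (x - 1) (x + 2) 1).foldl (fun acc i =>
    (PySem.List.pyRange (y - 1) (y + 2) 1).foldl (fun acc j =>
      if i > -1 ∧ j > -1 ∧ ¬(i = x ∧ j = y) then acc + imamoMino i j mine else acc) acc) 0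

def sosedi_s_stevilom_min (mine : List (List Int)) (s : Int) (v : Int) (stevilomin : Int) : List (List Int) :=
  (PySem.List.pyRange 0 s 1).foldl (fun acc i =>
    (PySem.List.pyRange 0 v 1).foldl (fun acc j =>
      if sosedov i j mine = stevilomin then PySem.Set.add acc [i, j] else acc) acc) PySem.Set.empty

-- ===== PORT B =====
def sosedi_s_stevilom_min_alt (mine : List (List Int)) (s : Int) (v : Int) (stevilomin : Int) : List (List Int) :=
  if s < 1 ∨ v < 1 then PySem.Set.empty else
  let grid := (PySem.List.pyRange 0 (s + 1) 1).map (fun x =>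
    (PySem.List.pyRange 0 (v + 1) 1).map (fun y => if [x, y] ∈ mine then (1 : Int) else 0))
  let horiz := grid.map (fun row =>
    (PySem.List.pyRange 0 v 1).map (fun j =>
      (if j > 0 then PySem.List.pyGetD row (j - 1) 0 else 0)
      + PySem.List.pyGetD row j 0 + PySem.List.pyGetD row (j + 1) 0))
  let zeros := List.replicate v.toNat (0 : Int)
  (PySem.List.pyRange 0 s 1).foldl (fun acc i =>
    let above := if i > 0 then PySem.List.pyGetD horiz (i - 1) [] else zeros
    let here := PySem.List.pyGetD horiz i []
    let below := PySem.List.pyGetD horiz (i + 1) []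
    let row := PySem.List.pyGetD grid i []
    (PySem.List.pyRange 0 v 1).foldl (fun acc j =>
      if PySem.List.pyGetD above j 0 + PySem.List.pyGetD here j 0
         + PySem.List.pyGetD below j 0 - PySem.List.pyGetD row j 0 = stevilomin
      then PySem.Set.add acc [i, j] else acc) acc) PySem.Set.empty

-- ===== PRECONDITION & SPEC =====
def Spec_sosedi_s_stevilom_min (mine : List (List Int)) (s : Int) (v : Int) (stevilomin : Int) (out : List (List Int)) : Prop := out = sosedi_s_stevilom_min_alt mine s v stevilomin
instance (mine : List (List Int)) (s : Int) (v : Int) (stevilomin : Int) (out : List (List Int)) : Decidable (Spec_sosedi_s_stevilom_min mine s v stevilomin out) := by unfold Spec_sosedi_s_stevilom_min; infer_instance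

-- ===== CLAIM (what is proved, stated in full; the proofs are below) =====
def Claim_equal_sosedi_s_stevilom_min : Prop := ∀ (mine : List (List Int)) (s : Int) (v : Int) (stevilomin : Int), Dom_sosedi_s_stevilom_min mine s v stevilomin → Spec_sosedi_s_stevilom_min mine s v stevilomin (sosedi_s_stevilom_min mine s v stevilomin)


-- ===== LEMMAS AND PROOFS =====

-- indexing a comprehension over range(0, n) at an in-range Int index
lemma pvGetDMapRange {a : Type} (f : Int -> a) (d : a) (n x : Int) (h0 : 0 <= x) (h1 : x < n) :
    PySem.List.pyGetD ((PySem.List.pyRange 0 n 1).map f) x d = f x :=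
  PySem.List.pyGetD_map_pyRange_of_nonneg f n x d h0 h1

-- indexing one raster row of B's grid
lemma pvRowGet (mine : List (List Int)) (v x y : Int) (h0 : 0 <= y) (h1 : y <= v) :
    PySem.List.pyGetD ((PySem.List.pyRange 0 (v + 1) 1).map
        (fun y => if [x, y] ∈ mine then (1 : Int) else 0)) y 0 = imamoMino x y mine := by
  rw [pvGetDMapRange _ _ _ _ h0 (by omega)]
  rfl

-- indexing one row of B's horiz at an in-range column
lemma pvHorizGet (mine : List (List Int)) (v x j : Int) (h0 : 0 <= j) (h1 : j < v) :
    PySem.List.pyGetD ((PySem.List.pyRange 0 v 1).map (fun j =>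
        (if j > 0 then PySem.List.pyGetD ((PySem.List.pyRange 0 (v + 1) 1).map
            (fun y => if [x, y] ∈ mine then (1 : Int) else 0)) (j - 1) 0 else 0)
        + PySem.List.pyGetD ((PySem.List.pyRange 0 (v + 1) 1).map
            (fun y => if [x, y] ∈ mine then (1 : Int) else 0)) j 0
        + PySem.List.pyGetD ((PySem.List.pyRange 0 (v + 1) 1).map
            (fun y => if [x, y] ∈ mine then (1 : Int) else 0)) (j + 1) 0)) j 0
      = (if j > 0 then imamoMino x (j - 1) mine else 0)
        + imamoMino x j mine + imamoMino x (j + 1) mine := by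
  rw [pvGetDMapRange _ _ _ _ h0 h1]
  rw [pvRowGet mine v x j h0 (by omega), pvRowGet mine v x (j + 1) (by omega) (by omega)]
  by_cases hj : j > 0
  · rw [if_pos hj, if_pos hj, pvRowGet mine v x (j - 1) (by omega) (by omega)]
  · rw [if_neg hj, if_neg hj]

lemma pvZerosGet (v j : Int) : PySem.List.pyGetD (List.replicate v.toNat (0 : Int)) j 0 = 0 := by
  cases h : PySem.List.pyGet? (List.replicate v.toNat (0 : Int)) j with
  | none => simp [PySem.List.pyGetD, h]
  | some x =>
      have hx := PySem.List.mem_of_pyGet?_eq_some _ h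
      simp [PySem.List.pyGetD, h, List.eq_of_mem_replicate hx]

lemma pyRangeNbr (a : Int) : PySem.List.pyRange (a - 1) (a + 2) 1 = [a - 1, a, a + 1] := by
  rw [PySem.List.pyRange_one]
  norm_num [show Int.toNat 3 = 3 from rfl, List.range_succ]
  ring

lemma ite_acc (c : Prop) [Decidable c] (acc t : Int) :
    (if c then acc + t else acc) = acc + (if c then t else 0) := by
  split_ifs <;> simp

-- A's per-cell count, written as the sum of the eight neighbour indicators with
-- boundary guards resolved for a cell (i, j) of the grid (0 <= i, 0 <= j)
lemma sosedov_window (mine : List (List Int)) (i j : Int) (hi : 0 <= i) (hj : 0 <= j) :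
    sosedov i j mine
      = (if i > 0 ∧ j > 0 then imamoMino (i - 1) (j - 1) mine else 0)
        + (if i > 0 then imamoMino (i - 1) j mine else 0)
        + (if i > 0 then imamoMino (i - 1) (j + 1) mine else 0)
        + (if j > 0 then imamoMino i (j - 1) mine else 0)
        + imamoMino i (j + 1) mine
        + (if j > 0 then imamoMino (i + 1) (j - 1) mine else 0)
        + imamoMino (i + 1) j mine
        + imamoMino (i + 1) (j + 1) mine := by
  simp only [sosedov, pyRangeNbr, List.foldl, ite_acc]
  rw [if_congr (show (i - 1 > -1 ∧ j - 1 > -1 ∧ ¬(i - 1 = i ∧ j - 1 = j)) ↔ (i > 0 ∧ j > 0) by omega) rfl rfl,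
      if_congr (show (i - 1 > -1 ∧ j > -1 ∧ ¬(i - 1 = i ∧ True)) ↔ (i > 0) by omega) rfl rfl,
      if_congr (show (i - 1 > -1 ∧ j + 1 > -1 ∧ ¬(i - 1 = i ∧ j + 1 = j)) ↔ (i > 0) by omega) rfl rfl,
      if_congr (show (i > -1 ∧ j - 1 > -1 ∧ ¬(True ∧ j - 1 = j)) ↔ (j > 0) by omega) rfl rfl,
      if_neg (show ¬(i > -1 ∧ j > -1 ∧ ¬(True ∧ True)) by simp),
      if_pos (show i > -1 ∧ j + 1 > -1 ∧ ¬(True ∧ j + 1 = j) by omega),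
      if_congr (show (i + 1 > -1 ∧ j - 1 > -1 ∧ ¬(i + 1 = i ∧ j - 1 = j)) ↔ (j > 0) by omega) rfl rfl,
      if_pos (show i + 1 > -1 ∧ j > -1 ∧ ¬(i + 1 = i ∧ True) by omega),
      if_pos (show i + 1 > -1 ∧ j + 1 > -1 ∧ ¬(i + 1 = i ∧ j + 1 = j) by omega)]
  ring

-- a fold whose step returns the accumulator unchanged is the identity
lemma pvFoldlId (l : List Int) (acc : List (List Int)) :
    l.foldl (fun acc _ => acc) acc = acc := by
  induction l generalizing acc with
  | nil => rfl
  | cons x xs ih => exact ih acc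

-- ===== VERDICT (by name: the statement is the Claim_ definition above) =====
theorem sosedi_s_stevilom_min_spec : Claim_equal_sosedi_s_stevilom_min := by
  intro mine s v stevilomin _hdom
  unfold Spec_sosedi_s_stevilom_min
  by_cases hsv : s < 1 ∨ v < 1
  · simp only [sosedi_s_stevilom_min, sosedi_s_stevilom_min_alt, if_pos hsv]
    rcases hsv with hs | hv
    · rw [PySem.List.pyRange_one_eq_nil (by omega : s ≤ (0:Int))]
      rfl
    · simp only [show PySem.List.pyRange 0 v 1 = [] from PySem.List.pyRange_one_eq_nil (by omega),
        List.foldl_nil, pvFoldlId]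
  simp only [sosedi_s_stevilom_min, sosedi_s_stevilom_min_alt, if_neg hsv, List.map_map]
  apply PySem.List.foldl_congr_mem
  intro acc i hi
  apply PySem.List.foldl_congr_mem
  intro acc2 j hj
  rw [PySem.List.mem_pyRange_one] at hi hj
  obtain ⟨hi0, his⟩ := hi
  obtain ⟨hj0, hjv⟩ := hj
  congr 1
  by_cases hI : i > 0
  · rw [if_pos hI,
        pvGetDMapRange _ _ _ (i - 1) (by omega) (by omega),
        pvGetDMapRange _ _ _ i hi0 (by omega)]
    rw [pvGetDMapRange _ _ _ (i + 1) (by omega) (by omega),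
        pvGetDMapRange _ _ _ i hi0 (by omega)]
    simp only [Function.comp]
    rw [pvHorizGet mine v (i - 1) j hj0 hjv, pvHorizGet mine v i j hj0 hjv,
        pvHorizGet mine v (i + 1) j hj0 hjv, pvRowGet mine v i j hj0 (by omega)]
    rw [sosedov_window mine i j hi0 hj0]
    congr 1
    split_ifs <;> (first | ring1 | (exfalso; omega))
  · rw [if_neg hI,
        pvGetDMapRange _ _ _ i hi0 (by omega)]
    rw [pvGetDMapRange _ _ _ (i + 1) (by omega) (by omega),
        pvGetDMapRange _ _ _ i hi0 (by omega)]
    simp only [Function.comp]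
    rw [pvHorizGet mine v i j hj0 hjv, pvHorizGet mine v (i + 1) j hj0 hjv,
        pvRowGet mine v i j hj0 (by omega), pvZerosGet]
    rw [sosedov_window mine i j hi0 hj0]
    congr 1
    split_ifs <;> (first | ring1 | (exfalso; omega))
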